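-- pv_equiv track=rewrite | github.com/maguzman5/gcc-cloud | scripts/lambda/gcc_upload_csv/main.py | split_rows
-- ===== SOURCE A (Python) =====
-- def split_rows(header, rows, n):
--     current_rows = [header]
--     file_number = 1
--
--     csv_list = []
--     for row in rows:
--         current_rows.append(row + '\n')  # Add back the newline character
--         if len(current_rows) >= n:
--             csv_list.append(''.join(current_rows))
--             current_rows = [header]
--             file_number += 1
--
--     return csv_list
-- ===== SOURCE B (Python) =====
-- def split_rows(header, rows, n):
--     step = max(n - 1, 1)
--     csv_list = []
--     while len(rows) >= step:
--         csv_list.append(header + ''.join(row + '\n' for row in rows[:step]))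
--         rows = rows[step:]
--     return csv_list
-- ===== Notes on version B (the rewrite author's own statement) =====
-- stated objective: simpler
-- what changed: Replaces A's per-row accumulate-and-conditional-flush stream (buffer list, flush when it fills) with a direct block decomposition: compute the chunk size step = max(n-1, 1) once, then repeatedly slice off the next step rows and emit header + joined block, stopping when fewer than step rows remain (which drops the trailing remainder exactly as A does).
import Mathlib
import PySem

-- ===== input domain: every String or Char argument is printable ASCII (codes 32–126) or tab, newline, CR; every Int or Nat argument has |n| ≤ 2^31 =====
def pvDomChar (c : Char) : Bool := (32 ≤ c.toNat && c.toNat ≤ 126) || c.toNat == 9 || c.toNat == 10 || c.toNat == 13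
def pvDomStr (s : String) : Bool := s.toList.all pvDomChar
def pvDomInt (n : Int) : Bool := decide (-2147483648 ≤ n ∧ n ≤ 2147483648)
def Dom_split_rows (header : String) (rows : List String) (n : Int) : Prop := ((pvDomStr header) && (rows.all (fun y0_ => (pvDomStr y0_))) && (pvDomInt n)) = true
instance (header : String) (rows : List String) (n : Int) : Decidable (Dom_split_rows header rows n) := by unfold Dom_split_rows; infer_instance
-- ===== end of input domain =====

-- B replaces A's per-row accumulate-and-flush buffer with a direct slice-off-step-rows block loop (same cost, simpler decomposition).


-- ===== PORT A =====
-- one step of A's for-loop: append row+'\n' to current_rows; flush when len(current_rows) >= n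
def splitRowsStep (header : String) (n : Int) (s : List String × List String) (row : String) : List String × List String :=
  let current := s.1 ++ [row ++ "\n"]
  if (current.length : Int) ≥ n then ([header], s.2 ++ [PySem.Str.join "" current])
  else (current, s.2)

def split_rows (header : String) (rows : List String) (n : Int) : List String :=
  (rows.foldl (splitRowsStep header n) ([header], [])).2

-- ===== PORT B =====
-- Source B's while-loop: while len(rows) >= step, emit header + joined slice rows[:step], continue on rows[step:].
-- step = max(n-1,1) ≥ 1 always, so rows[:step]/rows[step:] are take/drop; the '1 ≤ step' guard only makes the recursion total.
def splitRowsAltLoop (header : String) (step : Nat) (rows : List String) : List String :=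
  if 1 ≤ step ∧ step ≤ rows.length then
    (header ++ PySem.Str.join "" ((rows.take step).map (fun row => row ++ "\n")))
      :: splitRowsAltLoop header step (rows.drop step)
  else []
termination_by rows.length
decreasing_by simp only [List.length_drop]; omega

def split_rows_alt (header : String) (rows : List String) (n : Int) : List String :=
  splitRowsAltLoop header (max (n - 1) 1).toNat rows

-- ===== PRECONDITION & SPEC =====
def Spec_split_rows (header : String) (rows : List String) (n : Int) (out : List String) : Prop := out = split_rows_alt header rows n
instance (header : String) (rows : List String) (n : Int) (out : List String) : Decidable (Spec_split_rows header rows n out) := by unfold Spec_split_rows; infer_instance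

-- ===== CLAIM (what is proved, stated in full; the proofs are below) =====
def Claim_equal_split_rows : Prop := ∀ (header : String) (rows : List String) (n : Int), Dom_split_rows header rows n → Spec_split_rows header rows n (split_rows header rows n)

-- ===== LEMMAS AND PROOFS =====

lemma join_empty_cons (a : String) (l : List String) :
    PySem.Str.join "" (a :: l) = a ++ PySem.Str.join "" l := by
  apply String.toList_inj.mp
  simp only [PySem.Str.toList_join, List.map_cons, String.toList_append]
  cases l with
  | nil => simp [PySem.Chars.join_singleton, PySem.Chars.join_nil]
  | cons q rest =>
    simp only [List.map_cons]
    rw [PySem.Chars.join_cons_cons]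
    simp

-- A's flush test 'len(current_rows) >= n' after the append, with k rows already buffered,
-- fires exactly when the buffer reaches the block size max(n-1,1).
lemma flush_iff (n : Int) (k : Nat) :
    (((k : Int) + 2) ≥ n) ↔ (max (n - 1) 1).toNat ≤ k + 1 := by omega

-- one unfolding of B's loop when a full block is available
lemma altLoop_block (header : String) (s : Nat) (blk rest : List String)
    (h1 : 1 ≤ s) (hlen : blk.length = s) :
    splitRowsAltLoop header s (blk ++ rest)
      = (header ++ PySem.Str.join "" (blk.map (fun row => row ++ "\n")))
          :: splitRowsAltLoop header s rest := by
  rw [splitRowsAltLoop]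
  rw [if_pos ⟨h1, by simp only [List.length_append]; omega⟩]
  rw [List.take_left' hlen, List.drop_left' hlen]

-- Invariant for A's loop: with buffer buf (strictly below the block size) and output acc,
-- the rest of the run emits acc followed by B's block decomposition of buf ++ rows.
lemma key (header : String) (n : Int) (rows : List String) :
    ∀ (buf acc : List String), buf.length + 1 ≤ (max (n - 1) 1).toNat →
      (rows.foldl (splitRowsStep header n)
        (header :: buf.map (fun row => row ++ "\n"), acc)).2
      = acc ++ splitRowsAltLoop header (max (n - 1) 1).toNat (buf ++ rows) := by
  induction rows with
  | nil =>
    intro buf acc hbuf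
    rw [splitRowsAltLoop]
    rw [if_neg (by simp only [List.append_nil]; omega)]
    simp
  | cons row rows ih =>
    intro buf acc hbuf
    rw [List.foldl_cons]
    have hcur : (header :: buf.map (fun r => r ++ "\n")) ++ [row ++ "\n"]
        = header :: (buf ++ [row]).map (fun r => r ++ "\n") := by simp
    have hclen : (header :: (buf ++ [row]).map (fun r => r ++ "\n")).length = buf.length + 2 := by
      simp
    by_cases hf : (max (n - 1) 1).toNat ≤ buf.length + 1
    · -- flush: buffer reached the block size
      have hge : ((buf.length : Int) + 2) ≥ n := (flush_iff n buf.length).mpr hf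
      have hstep : splitRowsStep header n (header :: buf.map (fun r => r ++ "\n"), acc) row
          = ([header], acc ++ [PySem.Str.join "" (header :: (buf ++ [row]).map (fun r => r ++ "\n"))]) := by
        simp only [splitRowsStep, hcur, hclen]
        rw [if_pos (by push_cast; omega)]
      rw [hstep]
      have h0 : ([header] : List String) = header :: ([] : List String).map (fun r => r ++ "\n") := by simp
      rw [h0, ih [] _ (by simp only [List.length_nil]; omega)]
      have hlen : (buf ++ [row]).length = (max (n - 1) 1).toNat := by
        simp only [List.length_append, List.length_cons, List.length_nil]
        omega
      have hsplit : buf ++ row :: rows = (buf ++ [row]) ++ rows := by simp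
      rw [hsplit, altLoop_block header _ _ _ (by omega) hlen]
      rw [join_empty_cons]
      simp
    · -- no flush: keep accumulating
      have hstep : splitRowsStep header n (header :: buf.map (fun r => r ++ "\n"), acc) row
          = (header :: (buf ++ [row]).map (fun r => r ++ "\n"), acc) := by
        simp only [splitRowsStep, hcur, hclen]
        rw [if_neg]
        intro hge
        exact hf ((flush_iff n buf.length).mp (by push_cast at hge ⊢; omega))
      rw [hstep, ih (buf ++ [row]) acc (by simp only [List.length_append, List.length_cons, List.length_nil]; omega)]
      simp

-- ===== VERDICT (by name: the statement is the Claim_ definition above) =====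
theorem split_rows_spec : Claim_equal_split_rows := by
  intro header rows n _
  unfold Spec_split_rows split_rows split_rows_alt
  have h0 : ([header] : List String) = header :: ([] : List String).map (fun r => r ++ "\n") := by simp
  rw [h0, key header n rows [] [] (by simp only [List.length_nil]; omega)]
  simp
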